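-- pv_equiv track=rewrite | github.com/VictoryIsOurs/programmers | level1-선영/모의고사.py | solution
-- ===== SOURCE A (Python) =====
-- def solution(answers):
--     stu1 = [1,2,3,4,5]
--     stu2 = [2,1,2,3,2,4,2,5]
--     stu3 = [3,3,1,1,2,2,4,4,5,5]
--     score1, score2, score3 = 0,0,0
--
--     for i in range(len(answers)):
--         count1 = i%len(stu1) #index값을 나타냄
--         count2 = i%len(stu2)
--         count3 = i%len(stu3)
--
--         if stu1[count1] == answers[i]:
--             score1+=1
--         if stu2[count2] == answers[i]:
--             score2+=1
--         if stu3[count3] == answers[i]: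
--             score3+=1
--
--     max_score = max(score1, score2, score3)
--
--     answer = []
--     if max_score == score1:
--         answer.append(1)
--     if max_score == score2:
--         answer.append(2)
--     if max_score == score3:
--         answer.append(3)
--
--     return answer
-- ===== SOURCE B (Python) =====
-- def solution(answers):
--     patterns = [[1, 2, 3, 4, 5],
--                 [2, 1, 2, 3, 2, 4, 2, 5],
--                 [3, 3, 1, 1, 2, 2, 4, 4, 5, 5]]
--
--     def score(p, xs):
--         # consume the answer sheet block-by-block: zip each block with the
--         # pattern (zip truncates the last partial block), no per-element
--         # index arithmetic
--         s, j = 0, 0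
--         while j < len(xs):
--             s += sum(u == v for u, v in zip(p, xs[j:j + len(p)]))
--             j += len(p)
--         return s
--
--     scores = [score(p, answers) for p in patterns]
--     best = max(scores)
--     return [k + 1 for k, s in enumerate(scores) if s == best]
-- ===== Notes on version B (the rewrite author's own statement) =====
-- stated objective: alternative
-- what changed: A makes one indexed pass with i % len cyclic indexing feeding three parallel counters and an if-chain; B scores each pattern separately by zipping it against successive blocks of the answer sheet (a while loop slicing off len(p) answers at a time, no index arithmetic), then picks the winners with max() and a comprehension.
import Mathlib
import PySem

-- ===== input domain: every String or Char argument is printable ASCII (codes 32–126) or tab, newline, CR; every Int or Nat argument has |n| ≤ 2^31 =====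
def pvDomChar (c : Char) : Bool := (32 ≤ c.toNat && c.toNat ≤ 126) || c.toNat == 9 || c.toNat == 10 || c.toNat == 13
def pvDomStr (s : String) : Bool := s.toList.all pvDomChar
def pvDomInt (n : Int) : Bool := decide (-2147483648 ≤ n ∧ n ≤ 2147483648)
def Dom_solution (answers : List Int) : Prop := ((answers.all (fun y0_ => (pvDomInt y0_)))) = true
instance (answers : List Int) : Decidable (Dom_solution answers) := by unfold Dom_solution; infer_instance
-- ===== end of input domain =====

-- B replaces A's single indexed pass (i % len cyclic indexing feeding three parallel
-- counters and an if-chain) by per-pattern block-wise scoring: each pattern is zipped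
-- against successive blocks of the answer sheet, with max() and a comprehension
-- picking the winners (alternative decomposition; no index arithmetic at all).

-- ===== PORT A =====
def solution (answers : List Int) : List Int :=
  let stu1 : List Int := [1,2,3,4,5]
  let stu2 : List Int := [2,1,2,3,2,4,2,5]
  let stu3 : List Int := [3,3,1,1,2,2,4,4,5,5]
  let s :=
    (PySem.List.pyRange 0 (PySem.List.len answers) 1).foldl
      (fun (s : Int × Int × Int) i =>
        let count1 := PySem.Int.mod i (PySem.List.len stu1)
        let count2 := PySem.Int.mod i (PySem.List.len stu2)
        let count3 := PySem.Int.mod i (PySem.List.len stu3)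
        let s1 := if PySem.List.pyGetD stu1 count1 0 = PySem.List.pyGetD answers i 0 then s.1 + 1 else s.1
        let s2 := if PySem.List.pyGetD stu2 count2 0 = PySem.List.pyGetD answers i 0 then s.2.1 + 1 else s.2.1
        let s3 := if PySem.List.pyGetD stu3 count3 0 = PySem.List.pyGetD answers i 0 then s.2.2 + 1 else s.2.2
        (s1, s2, s3))
      (0, 0, 0)
  let max_score := max s.1 (max s.2.1 s.2.2)
  (if max_score = s.1 then [1] else []) ++
  (if max_score = s.2.1 then [2] else []) ++
  (if max_score = s.2.2 then [3] else [])

-- ===== PORT B =====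
-- Source B's `score`: a while loop zipping the pattern with one block xs[j:j+len(p)] at a
-- time; the `p = []` branch is only a totality guard (every pattern passed is a nonempty literal).
def pvScoreB (p : List Int) (xs : List Int) (j : Int) : Int :=
  if hp : p = [] then 0
  else if hj : j < PySem.List.len xs then
    ((List.zip p (PySem.List.slice xs (some j) (some (j + PySem.List.len p)))).map
        (fun q => if q.1 = q.2 then (1:Int) else 0)).sum
      + pvScoreB p xs (j + PySem.List.len p)
  else 0
termination_by (PySem.List.len xs - j).toNat
decreasing_by
  have h1 : 0 < p.length := List.length_pos_iff.mpr hp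
  simp only [PySem.List.len] at *
  omega

def solution_alt (answers : List Int) : List Int :=
  let patterns : List (List Int) :=
    [[1,2,3,4,5], [2,1,2,3,2,4,2,5], [3,3,1,1,2,2,4,4,5,5]]
  let scores := patterns.map (fun p => pvScoreB p answers 0)
  -- scores always has three elements, so Python's max(scores) never raises; .getD 0 is unreachable
  let best := (PySem.List.max? scores id).getD 0
  ((PySem.List.enumerate scores).filter (fun q => q.2 == best)).map (fun q => q.1 + 1)

-- ===== PRECONDITION & SPEC =====
def Spec_solution (answers : List Int) (out : List Int) : Prop := out = solution_alt answers
instance (answers : List Int) (out : List Int) : Decidable (Spec_solution answers out) := by unfold Spec_solution; infer_instance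

-- ===== CLAIM (what is proved, stated in full; the proofs are below) =====
def Claim_equal_solution : Prop := ∀ (answers : List Int), Dom_solution answers → Spec_solution answers (solution answers)

-- ===== LEMMAS AND PROOFS =====

-- common yardstick: match count against a rotating cycle, consuming xs one element at a time
def pvCnt : List Int → List Int → Int
  | _, [] => 0
  | [], _ :: xs => pvCnt [] xs
  | c :: cs, x :: xs => (if c = x then (1:Int) else 0) + pvCnt (cs ++ [c]) xs
termination_by _ xs => xs.length

theorem pvCnt_nil (cyc : List Int) : pvCnt cyc [] = 0 := by cases cyc <;> simp [pvCnt]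

-- a fold over range(len(xs)) reading xs[i] is a fold over enumerate(xs)
theorem foldl_pyRange_eq_foldl_enumerate {β : Type} (xs : List Int) (f : β → Int × Int → β) (init : β) :
    (PySem.List.pyRange 0 (PySem.List.len xs)).foldl
      (fun s j => f s (j, PySem.List.pyGetD xs j 0)) init
    = (PySem.List.enumerate xs).foldl f init := by
  rw [PySem.List.enumerate_eq_map_pyRange xs 0, List.foldl_map]

-- the three-counter fold splits into three independent 0/1 sums
theorem foldl_triple_counts (xs : List (Int × Int)) (c1 c2 c3 : Int × Int → Prop)
    [DecidablePred c1] [DecidablePred c2] [DecidablePred c3] (a b c : Int) :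
    xs.foldl (fun (s : Int × Int × Int) q =>
        (if c1 q then s.1 + 1 else s.1,
         if c2 q then s.2.1 + 1 else s.2.1,
         if c3 q then s.2.2 + 1 else s.2.2)) (a, b, c)
    = (a + (xs.map fun q => if c1 q then (1 : Int) else 0).sum,
       b + (xs.map fun q => if c2 q then (1 : Int) else 0).sum,
       c + (xs.map fun q => if c3 q then (1 : Int) else 0).sum) := by
  induction xs generalizing a b c with
  | nil => simp
  | cons h t ih =>
    simp only [List.foldl_cons, List.map_cons, List.sum_cons, ih]
    split_ifs <;> simp_all <;> omega

-- A's per-index cyclic sum IS the rotating-cycle count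
theorem sum_enum_eq_pvCnt (p : List Int) (hp : p ≠ []) (xs : List Int) : ∀ (k : Nat),
    ((PySem.List.enumerate xs (k : Int)).map
      (fun q => if PySem.List.pyGetD p (PySem.Int.mod q.1 (PySem.List.len p)) 0 = q.2 then (1:Int) else 0)).sum
    = pvCnt (p.rotate k) xs := by
  induction xs with
  | nil => intro k; simp [PySem.List.enumerate_nil, pvCnt_nil]
  | cons x xs ih =>
    intro k
    have hL : 0 < p.length := List.length_pos_iff.mpr hp
    obtain ⟨c, cs, hcc⟩ : ∃ c cs, p.rotate k = c :: cs := by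
      cases hr : p.rotate k with
      | nil => exact absurd (by simpa using congrArg List.length hr) (by omega)
      | cons a l => exact ⟨a, l, rfl⟩
    have hc : c = p[k % p.length]'(Nat.mod_lt _ hL) := by
      have h0 : (0 : Nat) < (p.rotate k).length := by simp [hcc]
      have := List.getElem_rotate p k 0 h0
      simpa [hcc] using this
    have hget : PySem.List.pyGetD p (PySem.Int.mod ((k : Nat) : Int) (PySem.List.len p)) 0 = c := by
      rw [show PySem.List.len p = ((p.length : Nat) : Int) from rfl, PySem.Int.mod_natCast,
        PySem.List.pyGetD_natCast, hc]
      exact List.getD_eq_getElem p 0 (Nat.mod_lt _ hL)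
    rw [PySem.List.enumerate_cons, List.map_cons, List.sum_cons, hget,
      show ((k : Nat) : Int) + 1 = (((k + 1 : Nat)) : Int) by push_cast; ring, ih (k + 1),
      show p.rotate (k + 1) = cs ++ [c] by
        rw [← List.rotate_rotate, hcc, show (1:Nat) = 0 + 1 from rfl, List.rotate_cons_succ,
          List.rotate_zero],
      hcc, pvCnt]

-- the rotating count splits at a chunk boundary
theorem pvCnt_chunk (xs : List Int) : ∀ (v u : List Int),
    pvCnt (v ++ u) xs
      = ((List.zip v xs).map (fun q => if q.1 = q.2 then (1:Int) else 0)).sum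
        + pvCnt ((v ++ u).rotate (min v.length xs.length)) (xs.drop v.length) := by
  induction xs with
  | nil => intro v u; simp [pvCnt_nil]
  | cons x xs ih =>
    intro v u
    cases v with
    | nil => simp
    | cons c cs =>
      rw [show ((c :: cs) ++ u) = c :: (cs ++ u) from rfl, pvCnt,
        show (cs ++ u) ++ [c] = cs ++ (u ++ [c]) by simp, ih cs (u ++ [c])]
      simp only [List.zip_cons_cons, List.map_cons, List.sum_cons, List.length_cons,
        Nat.succ_min_succ, List.drop_succ_cons]
      rw [show (c :: (cs ++ u)).rotate (min cs.length xs.length + 1)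
            = (cs ++ (u ++ [c])).rotate (min cs.length xs.length) by
          rw [show min cs.length xs.length + 1 = 0 + (min cs.length xs.length + 1) by omega,
            ← List.rotate_rotate, List.rotate_zero, List.rotate_cons_succ]; simp]
      ring

-- zip truncates at the shorter list, so taking the first block changes nothing
theorem zip_take_left_length (p ys : List Int) : List.zip p (ys.take p.length) = List.zip p ys := by
  induction p generalizing ys with
  | nil => simp
  | cons a l ih => cases ys <;> simp [ih]

-- B's block-wise score IS the rotating-cycle count
theorem pvScoreB_eq_pvCnt (p : List Int) (hp : p ≠ []) (xs : List Int) : ∀ (m : Nat) (j : Nat),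
    xs.length - j ≤ m → pvScoreB p xs (j : Int) = pvCnt p (xs.drop j) := by
  have hL : 0 < p.length := List.length_pos_iff.mpr hp
  intro m
  induction m with
  | zero =>
    intro j h
    rw [pvScoreB, List.drop_eq_nil_of_le (by omega : xs.length ≤ j)]
    simp only [hp, dite_false, pvCnt_nil]
    rw [dif_neg (by simp only [PySem.List.len]; omega)]
  | succ m ih =>
    intro j h
    by_cases hj : j < xs.length
    · rw [pvScoreB]
      simp only [hp, dite_false]
      rw [dif_pos (by simp only [PySem.List.len]; omega),
        show PySem.List.len p = ((p.length : Nat) : Int) from rfl,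
        PySem.List.slice_natCast_add, zip_take_left_length,
        show (j : Int) + ((p.length : Nat) : Int) = ((j + p.length : Nat) : Int) by push_cast; ring,
        ih (j + p.length) (by omega)]
      have hC := pvCnt_chunk (xs.drop j) p []
      simp only [List.append_nil] at hC
      rw [hC, List.drop_drop]
      by_cases hcmp : j + p.length ≤ xs.length
      · rw [min_eq_left (by simp only [List.length_drop]; omega), List.rotate_length]
      · rw [List.drop_eq_nil_of_le (by omega : xs.length ≤ j + p.length), pvCnt_nil, pvCnt_nil]
    · rw [pvScoreB, List.drop_eq_nil_of_le (by omega : xs.length ≤ j)]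
      simp only [hp, dite_false, pvCnt_nil]
      rw [dif_neg (by simp only [PySem.List.len]; omega)]

-- Python max of a nonempty triple is the binary max chain
theorem max?_triple (s1 s2 s3 : Int) :
    (PySem.List.max? [s1, s2, s3] id).getD 0 = max s1 (max s2 s3) := by
  simp only [PySem.List.max?, List.foldl, id_eq]
  by_cases h : s1 < s2 <;> simp [h, max_def] <;> split_ifs <;> simp_all <;> omega

-- abstracting the three scores, A's if-chain is B's filtered enumeration
theorem final_lists (s1 s2 s3 m : Int) :
    ((if m = s1 then [1] else []) ++
     (if m = s2 then [2] else []) ++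
     (if m = s3 then [3] else []) : List Int)
    = ((PySem.List.enumerate [s1, s2, s3]).filter
        (fun q => q.2 == m)).map (fun q => q.1 + 1) := by
  simp only [PySem.List.enumerate_cons, PySem.List.enumerate_nil, List.filter_cons,
    List.filter_nil, beq_iff_eq]
  norm_num
  split_ifs <;> first | omega | norm_num

theorem pvScoreB_eq_pvCnt_zero (p : List Int) (hp : p ≠ []) (xs : List Int) :
    pvScoreB p xs 0 = pvCnt p xs := by
  have := pvScoreB_eq_pvCnt p hp xs xs.length 0 (by omega)
  simpa using this

theorem solution_eq_alt (answers : List Int) : solution answers = solution_alt answers := by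
  unfold solution solution_alt
  simp only [List.map_cons, List.map_nil]
  rw [show (fun (s : Int × Int × Int) i =>
        let count1 := PySem.Int.mod i (PySem.List.len ([1,2,3,4,5] : List Int))
        let count2 := PySem.Int.mod i (PySem.List.len ([2,1,2,3,2,4,2,5] : List Int))
        let count3 := PySem.Int.mod i (PySem.List.len ([3,3,1,1,2,2,4,4,5,5] : List Int))
        let s1 := if PySem.List.pyGetD [1,2,3,4,5] count1 0 = PySem.List.pyGetD answers i 0 then s.1 + 1 else s.1
        let s2 := if PySem.List.pyGetD [2,1,2,3,2,4,2,5] count2 0 = PySem.List.pyGetD answers i 0 then s.2.1 + 1 else s.2.1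
        let s3 := if PySem.List.pyGetD [3,3,1,1,2,2,4,4,5,5] count3 0 = PySem.List.pyGetD answers i 0 then s.2.2 + 1 else s.2.2
        (s1, s2, s3))
      = fun (s : Int × Int × Int) j =>
        (fun (s : Int × Int × Int) (q : Int × Int) =>
          (if PySem.List.pyGetD [1,2,3,4,5] (PySem.Int.mod q.1 (PySem.List.len ([1,2,3,4,5] : List Int))) 0 = q.2 then s.1 + 1 else s.1,
           if PySem.List.pyGetD [2,1,2,3,2,4,2,5] (PySem.Int.mod q.1 (PySem.List.len ([2,1,2,3,2,4,2,5] : List Int))) 0 = q.2 then s.2.1 + 1 else s.2.1,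
           if PySem.List.pyGetD [3,3,1,1,2,2,4,4,5,5] (PySem.Int.mod q.1 (PySem.List.len ([3,3,1,1,2,2,4,4,5,5] : List Int))) 0 = q.2 then s.2.2 + 1 else s.2.2))
          s (j, PySem.List.pyGetD answers j 0) from rfl]
  rw [foldl_pyRange_eq_foldl_enumerate answers (fun (s : Int × Int × Int) (q : Int × Int) =>
        (if PySem.List.pyGetD [1,2,3,4,5] (PySem.Int.mod q.1 (PySem.List.len ([1,2,3,4,5] : List Int))) 0 = q.2 then s.1 + 1 else s.1,
         if PySem.List.pyGetD [2,1,2,3,2,4,2,5] (PySem.Int.mod q.1 (PySem.List.len ([2,1,2,3,2,4,2,5] : List Int))) 0 = q.2 then s.2.1 + 1 else s.2.1,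
         if PySem.List.pyGetD [3,3,1,1,2,2,4,4,5,5] (PySem.Int.mod q.1 (PySem.List.len ([3,3,1,1,2,2,4,4,5,5] : List Int))) 0 = q.2 then s.2.2 + 1 else s.2.2))
      ((0 : Int), (0 : Int), (0 : Int)), foldl_triple_counts]
  simp only [zero_add]
  have h1 := sum_enum_eq_pvCnt [1,2,3,4,5] (by simp) answers 0
  have h2 := sum_enum_eq_pvCnt [2,1,2,3,2,4,2,5] (by simp) answers 0
  have h3 := sum_enum_eq_pvCnt [3,3,1,1,2,2,4,4,5,5] (by simp) answers 0
  simp only [Nat.cast_zero, List.rotate_zero] at h1 h2 h3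
  rw [h1, h2, h3,
    pvScoreB_eq_pvCnt_zero [1,2,3,4,5] (by simp) answers,
    pvScoreB_eq_pvCnt_zero [2,1,2,3,2,4,2,5] (by simp) answers,
    pvScoreB_eq_pvCnt_zero [3,3,1,1,2,2,4,4,5,5] (by simp) answers]
  rw [max?_triple]
  exact final_lists _ _ _ _

-- ===== VERDICT (by name: the statement is the Claim_ definition above) =====
theorem solution_spec : Claim_equal_solution := fun answers _ => solution_eq_alt answers
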